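-- pv_equiv track=rewrite | github.com/4444J99/application-pipeline | scripts/score_human_dimensions.py | _tr_credential_track_relevance
-- ===== SOURCE A (Python) =====
-- CREDENTIALS = {
--     "mfa_creative_writing": {
--         "writing": 4,
--         "grant": 3,
--         "residency": 3,
--         "prize": 3,
--         "program": 2,
--         "fellowship": 2,
--         "emergency": 2,
--         "consulting": 1,
--     },
--     "meta_fullstack_dev": {
--         "consulting": 4,
--         "fellowship": 3,
--         "program": 3,
--         "grant": 1,
--         "residency": 1,
--         "prize": 1,
--         "writing": 1,
--         "emergency": 1,
--     },
--     "teaching_11yr": {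
--         "program": 4,
--         "fellowship": 3,
--         "residency": 2,
--         "writing": 2,
--         "grant": 2,
--         "prize": 1,
--         "emergency": 1,
--         "consulting": 2,
--     },
--     "construction_pm": {
--         "consulting": 3,
--         "grant": 1,
--         "residency": 1,
--         "prize": 0,
--         "fellowship": 1,
--         "program": 1,
--         "writing": 0,
--         "emergency": 1,
--     },
-- }
--
-- def _tr_credential_track_relevance(entry: dict) -> tuple[int, str]:
--     """Signal 1: Best credential score for this entry's track."""
--     track = entry.get("track", "")
--     best_score = 0
--     best_cred = ""
--
--     for cred_name, track_scores in CREDENTIALS.items():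
--         cred_score = track_scores.get(track, 0)
--         if cred_score > best_score:
--             best_score = cred_score
--             best_cred = cred_name
--
--     if best_cred:
--         return best_score, f"{best_cred} for {track} -> {best_score}"
--     return 0, f"no credential scores for track={track} -> 0"
-- ===== SOURCE B (Python) =====
-- # Precomputed lookup table: for each track, the best credential score and the
-- # first credential (in CREDENTIALS order) achieving it; tracks where the best
-- # score would be 0 are simply absent.  Derived once, by hand, from CREDENTIALS.
-- TRACK_BEST = {
--     "writing": (4, "mfa_creative_writing"),
--     "grant": (3, "mfa_creative_writing"),
--     "residency": (3, "mfa_creative_writing"),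
--     "prize": (3, "mfa_creative_writing"),
--     "program": (4, "teaching_11yr"),
--     "fellowship": (3, "meta_fullstack_dev"),
--     "emergency": (2, "mfa_creative_writing"),
--     "consulting": (4, "meta_fullstack_dev"),
-- }
--
--
-- def _tr_credential_track_relevance(entry: dict) -> tuple[int, str]:
--     """Signal 1: Best credential score for this entry's track."""
--     track = entry.get("track", "")
--     hit = TRACK_BEST.get(track)
--     if hit is None:
--         return 0, f"no credential scores for track={track} -> 0"
--     score, cred = hit
--     return score, f"{cred} for {track} -> {score}"
-- ===== Notes on version B (the rewrite author's own statement) =====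
-- stated objective: alternative
-- what changed: Replaces the per-call max-scan over the nested CREDENTIALS dict with a flat precomputed lookup table TRACK_BEST (track -> (best_score, best_cred)), so each call is a single dict lookup instead of a loop with running best.
import Mathlib
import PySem

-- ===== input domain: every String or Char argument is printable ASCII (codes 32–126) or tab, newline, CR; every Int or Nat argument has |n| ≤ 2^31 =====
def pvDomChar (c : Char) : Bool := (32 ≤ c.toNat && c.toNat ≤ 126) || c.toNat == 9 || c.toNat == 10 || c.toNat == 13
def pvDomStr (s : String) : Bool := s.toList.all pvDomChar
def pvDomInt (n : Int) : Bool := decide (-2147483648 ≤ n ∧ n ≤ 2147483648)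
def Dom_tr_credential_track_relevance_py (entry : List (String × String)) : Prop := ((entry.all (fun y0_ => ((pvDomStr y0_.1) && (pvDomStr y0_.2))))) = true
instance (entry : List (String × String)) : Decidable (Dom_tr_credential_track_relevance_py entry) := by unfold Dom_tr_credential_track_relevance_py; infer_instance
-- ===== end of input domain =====

set_option maxRecDepth 100000


-- B replaces A's per-call scan over the nested CREDENTIALS dict with a flat
-- precomputed lookup table (track -> (best_score, best_cred)); return values identical.
-- ===== PORT A =====
-- module constant CREDENTIALS (dict of dicts, insertion order)
def pvCREDENTIALS : List (String × List (String × Int)) :=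
  [("mfa_creative_writing", [("writing", (4 : Int)), ("grant", (3 : Int)), ("residency", (3 : Int)), ("prize", (3 : Int)), ("program", (2 : Int)), ("fellowship", (2 : Int)), ("emergency", (2 : Int)), ("consulting", (1 : Int))]),
   ("meta_fullstack_dev", [("consulting", (4 : Int)), ("fellowship", (3 : Int)), ("program", (3 : Int)), ("grant", (1 : Int)), ("residency", (1 : Int)), ("prize", (1 : Int)), ("writing", (1 : Int)), ("emergency", (1 : Int))]),
   ("teaching_11yr", [("program", (4 : Int)), ("fellowship", (3 : Int)), ("residency", (2 : Int)), ("writing", (2 : Int)), ("grant", (2 : Int)), ("prize", (1 : Int)), ("emergency", (1 : Int)), ("consulting", (2 : Int))]),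
   ("construction_pm", [("consulting", (3 : Int)), ("grant", (1 : Int)), ("residency", (1 : Int)), ("prize", (0 : Int)), ("fellowship", (1 : Int)), ("program", (1 : Int)), ("writing", (0 : Int)), ("emergency", (1 : Int))])]

-- the for-loop over CREDENTIALS.items(): state (best_score, best_cred)
def pvBestA (track : String) : Int × String :=
  pvCREDENTIALS.foldl
    (fun b p =>
      let cred_score := (PySem.Dict.mk p.2).getD track 0
      if cred_score > b.1 then (cred_score, p.1) else b)
    (0, "")

def tr_credential_track_relevance_py (entry : List (String × String)) : Int × String :=
  let track := (PySem.Dict.mk entry).getD "track" ""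
  let bs := pvBestA track
  if bs.2 ≠ "" then
    (bs.1, bs.2 ++ " for " ++ track ++ " -> " ++ PySem.Int.toStr bs.1)
  else
    (0, "no credential scores for track=" ++ track ++ " -> 0")

-- ===== PORT B =====
-- Source B's literal precomputed table TRACK_BEST
def pvTRACK_BEST : PySem.Dict String (Int × String) :=
  PySem.Dict.mk
    [("writing", ((4 : Int), "mfa_creative_writing")),
     ("grant", ((3 : Int), "mfa_creative_writing")),
     ("residency", ((3 : Int), "mfa_creative_writing")),
     ("prize", ((3 : Int), "mfa_creative_writing")),
     ("program", ((4 : Int), "teaching_11yr")),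
     ("fellowship", ((3 : Int), "meta_fullstack_dev")),
     ("emergency", ((2 : Int), "mfa_creative_writing")),
     ("consulting", ((4 : Int), "meta_fullstack_dev"))]

def tr_credential_track_relevance_py_alt (entry : List (String × String)) : Int × String :=
  let track := (PySem.Dict.mk entry).getD "track" ""
  match pvTRACK_BEST.get? track with
  | none => (0, "no credential scores for track=" ++ track ++ " -> 0")
  | some hit => (hit.1, hit.2 ++ " for " ++ track ++ " -> " ++ PySem.Int.toStr hit.1)

-- ===== PRECONDITION & SPEC =====
def Spec_tr_credential_track_relevance_py (entry : List (String × String)) (out : Int × String) : Prop := out = tr_credential_track_relevance_py_alt entry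
instance (entry : List (String × String)) (out : Int × String) : Decidable (Spec_tr_credential_track_relevance_py entry out) := by unfold Spec_tr_credential_track_relevance_py; infer_instance

-- ===== CLAIM (what is proved, stated in full; the proofs are below) =====
def Claim_equal_tr_credential_track_relevance_py : Prop := ∀ (entry : List (String × String)), Dom_tr_credential_track_relevance_py entry → Spec_tr_credential_track_relevance_py entry (tr_credential_track_relevance_py entry)

-- ===== LEMMAS AND PROOFS =====

-- both ports depend on the input only through the looked-up track string
theorem pvCore_agree (t : String) :
    (let bs := pvBestA t
     if bs.2 ≠ "" then (bs.1, bs.2 ++ " for " ++ t ++ " -> " ++ PySem.Int.toStr bs.1)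
     else ((0 : Int), "no credential scores for track=" ++ t ++ " -> 0"))
    = (match pvTRACK_BEST.get? t with
       | none => ((0 : Int), "no credential scores for track=" ++ t ++ " -> 0")
       | some hit => (hit.1, hit.2 ++ " for " ++ t ++ " -> " ++ PySem.Int.toStr hit.1)) := by
  by_cases h1 : t = "writing"; · subst h1; decide
  by_cases h2 : t = "grant"; · subst h2; decide
  by_cases h3 : t = "residency"; · subst h3; decide
  by_cases h4 : t = "prize"; · subst h4; decide
  by_cases h5 : t = "program"; · subst h5; decide
  by_cases h6 : t = "fellowship"; · subst h6; decide
  by_cases h7 : t = "emergency"; · subst h7; decide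
  by_cases h8 : t = "consulting"; · subst h8; decide
  simp [pvBestA, pvCREDENTIALS, pvTRACK_BEST, PySem.Dict.getD, PySem.Dict.get?, List.foldl,
        Ne.symm h1, Ne.symm h2, Ne.symm h3, Ne.symm h4, Ne.symm h5, Ne.symm h6, Ne.symm h7, Ne.symm h8]

-- ===== VERDICT (by name: the statement is the Claim_ definition above) =====
theorem tr_credential_track_relevance_py_spec : Claim_equal_tr_credential_track_relevance_py := by
  intro entry _
  unfold Spec_tr_credential_track_relevance_py
  unfold tr_credential_track_relevance_py tr_credential_track_relevance_py_alt
  exact pvCore_agree _
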